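-- pv_equiv track=rewrite | github.com/deckedusa/Meisterplan | Scripts/get_AsanaTime.py | ready_mp_data_for_sheet
-- ===== SOURCE A (Python) =====
-- def ready_mp_data_for_sheet(mp_projects, mp_milestones):
--     header = ["projectName", "projectKey", "projectStart", "projectFinish", "projectId", "scenarioProjectId", "cust_asana_id", "milestoneName", "milestoneDate", "projectPhaseName"]
--     rows_for_sheet = [header]
--
--     milestones_by_project = {}
--     for ms in mp_milestones:
--         scenario_project_id = ms.get('scenarioProjectId') or ms.get('projectId')
--         if scenario_project_id not in milestones_by_project:
--             milestones_by_project[scenario_project_id] = []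
--         milestones_by_project[scenario_project_id].append(ms)
--
--     for project in mp_projects:
--         project_name = project.get('projectName')
--         project_key = project.get('projectKey')
--         project_start = project.get('projectStart')
--         project_finish = project.get('projectFinish')
--         project_id = project.get('projectId')
--         scenario_project_id = project.get('scenarioProjectId')
--         cust_asana_id = project.get('cust_asana_id')
--
--         project_milestones = milestones_by_project.get(scenario_project_id, [])
--
--         if not project_milestones:
--             rows_for_sheet.append([project_name, project_key, project_start, project_finish, project_id, scenario_project_id, cust_asana_id, "N/A", "N/A", "N/A"])
--             continue
--
--         for milestone in project_milestones:
--             row = [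
--                 project_name,
--                 project_key,
--                 project_start,
--                 project_finish,
--                 project_id,
--                 scenario_project_id,
--                 cust_asana_id,
--                 milestone.get('milestoneName'),
--                 milestone.get('milestoneDate'),
--                 milestone.get('projectPhaseName')
--             ]
--             rows_for_sheet.append(row)
--
--     return rows_for_sheet
-- ===== SOURCE B (Python) =====
-- def ready_mp_data_for_sheet(mp_projects, mp_milestones):
--     header = ["projectName", "projectKey", "projectStart", "projectFinish", "projectId", "scenarioProjectId", "cust_asana_id", "milestoneName", "milestoneDate", "projectPhaseName"]
--     rows_for_sheet = [header]
--
--     def milestone_key(ms):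
--         return ms.get('scenarioProjectId') or ms.get('projectId')
--
--     for project in mp_projects:
--         base = [project.get('projectName'),
--                 project.get('projectKey'),
--                 project.get('projectStart'),
--                 project.get('projectFinish'),
--                 project.get('projectId'),
--                 project.get('scenarioProjectId'),
--                 project.get('cust_asana_id')]
--         scenario_project_id = base[5]
--         matched = [ms for ms in mp_milestones if milestone_key(ms) == scenario_project_id]
--         if not matched:
--             rows_for_sheet.append(base + ["N/A", "N/A", "N/A"])
--         else:
--             rows_for_sheet.extend(
--                 base + [ms.get('milestoneName'), ms.get('milestoneDate'), ms.get('projectPhaseName')]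
--                 for ms in matched)
--     return rows_for_sheet
-- ===== Notes on version B (the rewrite author's own statement) =====
-- stated objective: alternative
-- what changed: Replaces the two-phase build-an-index-then-join (group milestones into a dict keyed by scenarioProjectId/projectId, then look each project up) with a single-phase nested-loop join that filters the full milestone list per project in encounter order.
import Mathlib
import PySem

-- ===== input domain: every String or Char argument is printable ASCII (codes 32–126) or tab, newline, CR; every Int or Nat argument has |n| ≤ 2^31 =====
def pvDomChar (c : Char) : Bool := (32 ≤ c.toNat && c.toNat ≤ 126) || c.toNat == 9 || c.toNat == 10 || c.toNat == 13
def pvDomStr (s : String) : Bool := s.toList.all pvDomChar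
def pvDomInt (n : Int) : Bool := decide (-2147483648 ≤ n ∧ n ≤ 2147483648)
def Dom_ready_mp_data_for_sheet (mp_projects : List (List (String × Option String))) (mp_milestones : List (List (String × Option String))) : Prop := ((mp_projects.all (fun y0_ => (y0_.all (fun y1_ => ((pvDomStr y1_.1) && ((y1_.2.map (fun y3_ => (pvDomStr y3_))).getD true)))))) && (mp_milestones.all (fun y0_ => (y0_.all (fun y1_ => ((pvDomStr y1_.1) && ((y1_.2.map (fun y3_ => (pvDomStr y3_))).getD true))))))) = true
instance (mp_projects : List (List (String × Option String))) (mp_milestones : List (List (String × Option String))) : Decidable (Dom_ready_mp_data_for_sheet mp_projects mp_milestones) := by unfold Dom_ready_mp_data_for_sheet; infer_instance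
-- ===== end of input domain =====

-- B replaces A's build-a-dict-index-then-join with a single-phase nested-loop join
-- (per project, filter the full milestone list); alternative decomposition, same results.

-- ===== PORT A =====

-- ms.get(k): first-match lookup in the association list, None when absent (exact).
def pvGetO (d : List (String × Option String)) (k : String) : Option String :=
  ((PySem.Dict.mk d).get? k).join

-- Python 'a or b' on Optional[str]: falsy = None or "" (exact).
def pvOrPy (a b : Option String) : Option String :=
  match a with
  | some s => if s = "" then b else some s
  | none => b

def pvMsKey (ms : List (String × Option String)) : Option String :=
  pvOrPy (pvGetO ms "scenarioProjectId") (pvGetO ms "projectId")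

def pvHeader : List (Option String) :=
  [some "projectName", some "projectKey", some "projectStart", some "projectFinish",
   some "projectId", some "scenarioProjectId", some "cust_asana_id",
   some "milestoneName", some "milestoneDate", some "projectPhaseName"]

def pvIndexStep (d : PySem.Dict (Option String) (List (List (String × Option String))))
    (ms : List (String × Option String)) :
    PySem.Dict (Option String) (List (List (String × Option String))) :=
  let k := pvMsKey ms
  let d := if d.contains k then d else d.insert k []
  d.modify k [] (fun l => l ++ [ms])

def ready_mp_data_for_sheet (mp_projects : List (List (String × Option String))) (mp_milestones : List (List (String × Option String))) : List (List (Option String)) :=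
  let milestones_by_project := mp_milestones.foldl pvIndexStep PySem.Dict.empty
  mp_projects.foldl (fun rows project =>
    let project_name := pvGetO project "projectName"
    let project_key := pvGetO project "projectKey"
    let project_start := pvGetO project "projectStart"
    let project_finish := pvGetO project "projectFinish"
    let project_id := pvGetO project "projectId"
    let scenario_project_id := pvGetO project "scenarioProjectId"
    let cust_asana_id := pvGetO project "cust_asana_id"
    let project_milestones := milestones_by_project.getD scenario_project_id []
    if project_milestones.isEmpty then
      rows ++ [[project_name, project_key, project_start, project_finish, project_id,
                scenario_project_id, cust_asana_id, some "N/A", some "N/A", some "N/A"]]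
    else
      project_milestones.foldl (fun rows milestone =>
        rows ++ [[project_name, project_key, project_start, project_finish, project_id,
                  scenario_project_id, cust_asana_id,
                  pvGetO milestone "milestoneName", pvGetO milestone "milestoneDate",
                  pvGetO milestone "projectPhaseName"]]) rows) [pvHeader]

-- ===== PORT B =====

def ready_mp_data_for_sheet_alt (mp_projects : List (List (String × Option String))) (mp_milestones : List (List (String × Option String))) : List (List (Option String)) :=
  mp_projects.foldl (fun rows project =>
    let base := [pvGetO project "projectName", pvGetO project "projectKey",
                 pvGetO project "projectStart", pvGetO project "projectFinish",
                 pvGetO project "projectId", pvGetO project "scenarioProjectId",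
                 pvGetO project "cust_asana_id"]
    let scenario_project_id := base[5]!
    let matched := mp_milestones.filter (fun ms => pvMsKey ms == scenario_project_id)
    rows ++ (if matched.isEmpty then
               [base ++ [some "N/A", some "N/A", some "N/A"]]
             else
               matched.map (fun ms =>
                 base ++ [pvGetO ms "milestoneName", pvGetO ms "milestoneDate",
                          pvGetO ms "projectPhaseName"]))) [pvHeader]

-- ===== PRECONDITION & SPEC =====
def Spec_ready_mp_data_for_sheet (mp_projects : List (List (String × Option String))) (mp_milestones : List (List (String × Option String))) (out : List (List (Option String))) : Prop := out = ready_mp_data_for_sheet_alt mp_projects mp_milestones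
instance (mp_projects : List (List (String × Option String))) (mp_milestones : List (List (String × Option String))) (out : List (List (Option String))) : Decidable (Spec_ready_mp_data_for_sheet mp_projects mp_milestones out) := by unfold Spec_ready_mp_data_for_sheet; infer_instance

-- ===== CLAIM (what is proved, stated in full; the proofs are below) =====
def Claim_equal_ready_mp_data_for_sheet : Prop := ∀ (mp_projects : List (List (String × Option String))) (mp_milestones : List (List (String × Option String))), Dom_ready_mp_data_for_sheet mp_projects mp_milestones → Spec_ready_mp_data_for_sheet mp_projects mp_milestones (ready_mp_data_for_sheet mp_projects mp_milestones)

-- ===== LEMMAS AND PROOFS =====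

-- one index step, seen through getD
theorem pvIndexStep_getD (d : PySem.Dict (Option String) (List (List (String × Option String))))
    (ms : List (String × Option String)) (c : Option String) :
    (pvIndexStep d ms).getD c [] =
      if pvMsKey ms = c then d.getD c [] ++ [ms] else d.getD c [] := by
  unfold pvIndexStep
  by_cases hk : pvMsKey ms = c
  · subst hk
    by_cases hc : d.contains (pvMsKey ms)
    · simp [hc, PySem.Dict.getD_modify_self]
    · simp only [Bool.not_eq_true] at hc
      simp [hc, PySem.Dict.getD_modify_self, PySem.Dict.getD_insert_self,
            PySem.Dict.getD_of_not_contains d _ hc]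
  · have hne : c ≠ pvMsKey ms := fun h => hk h.symm
    by_cases hc : d.contains (pvMsKey ms)
    · simp [hc, PySem.Dict.getD_modify_of_ne _ _ _ hne, hk]
    · simp only [Bool.not_eq_true] at hc
      simp [hc, PySem.Dict.getD_modify_of_ne _ _ _ hne,
            PySem.Dict.getD_insert_of_ne _ _ _ hne, hk]

-- the index's bucket for c is exactly the filter of the milestone list, in order
theorem pvIndex_getD (l : List (List (String × Option String)))
    (d : PySem.Dict (Option String) (List (List (String × Option String)))) (c : Option String) :
    (l.foldl pvIndexStep d).getD c [] = d.getD c [] ++ l.filter (fun ms => pvMsKey ms == c) := by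
  induction l generalizing d with
  | nil => simp
  | cons ms rest ih =>
    simp only [List.foldl_cons, List.filter_cons, ih, pvIndexStep_getD]
    by_cases h : pvMsKey ms = c <;> simp [h]

-- two folds with pointwise-equal step functions agree
theorem pvFoldl_ext {α β : Type} (f g : β → α → β) (l : List α) (init : β)
    (h : ∀ b a, f b a = g b a) : l.foldl f init = l.foldl g init := by
  induction l generalizing init with
  | nil => rfl
  | cons x rest ih => simp only [List.foldl_cons, h, ih]

-- A's inner append loop is acc ++ map
theorem pvFoldl_append_map {α β : Type} (l : List α) (f : α → β) (acc : List β) :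
    l.foldl (fun rows x => rows ++ [f x]) acc = acc ++ l.map f := by
  induction l generalizing acc with
  | nil => simp
  | cons x rest ih => simp [ih]

-- ===== VERDICT (by name: the statement is the Claim_ definition above) =====
theorem ready_mp_data_for_sheet_spec : Claim_equal_ready_mp_data_for_sheet := by
  intro mp_projects mp_milestones _
  show ready_mp_data_for_sheet mp_projects mp_milestones
       = ready_mp_data_for_sheet_alt mp_projects mp_milestones
  unfold ready_mp_data_for_sheet ready_mp_data_for_sheet_alt
  refine pvFoldl_ext _ _ _ _ (fun rows project => ?_)
  have hb : (mp_milestones.foldl pvIndexStep PySem.Dict.empty).getD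
      (pvGetO project "scenarioProjectId") []
      = mp_milestones.filter (fun ms => pvMsKey ms == pvGetO project "scenarioProjectId") := by
    simpa using pvIndex_getD mp_milestones PySem.Dict.empty (pvGetO project "scenarioProjectId")
  simp only [hb, pvFoldl_append_map, List.getElem!_cons_succ, List.getElem!_cons_zero]
  split_ifs with h
  · rfl
  · simp
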